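-- pv_equiv track=rewrite | github.com/Dominguezsa/Algorithm-Theory | practica/Grafos/Set_Cover.py | aporta_algo
-- ===== SOURCE A (Python) =====
-- def aporta_algo(parcial, nuevo):
--     if len(parcial) == 0:
--         return True
--     for elemento in nuevo:
--         for subset in parcial:
--             if elemento not in subset:
--                 return True
--     return False
-- ===== SOURCE B (Python) =====
-- def aporta_algo(parcial, nuevo):
--     if len(parcial) == 0:
--         return True
--     common = set(parcial[0]).intersection(*parcial[1:])
--     return any(e not in common for e in nuevo)
-- ===== Notes on version B (the rewrite author's own statement) =====
-- stated objective: faster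
-- what changed: Replaces the nested scan (each element of nuevo re-scanned against every subset, with early return) by one aggregation pass building the intersection of all subsets once, then a single hashed-membership pass over nuevo.
import Mathlib
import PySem

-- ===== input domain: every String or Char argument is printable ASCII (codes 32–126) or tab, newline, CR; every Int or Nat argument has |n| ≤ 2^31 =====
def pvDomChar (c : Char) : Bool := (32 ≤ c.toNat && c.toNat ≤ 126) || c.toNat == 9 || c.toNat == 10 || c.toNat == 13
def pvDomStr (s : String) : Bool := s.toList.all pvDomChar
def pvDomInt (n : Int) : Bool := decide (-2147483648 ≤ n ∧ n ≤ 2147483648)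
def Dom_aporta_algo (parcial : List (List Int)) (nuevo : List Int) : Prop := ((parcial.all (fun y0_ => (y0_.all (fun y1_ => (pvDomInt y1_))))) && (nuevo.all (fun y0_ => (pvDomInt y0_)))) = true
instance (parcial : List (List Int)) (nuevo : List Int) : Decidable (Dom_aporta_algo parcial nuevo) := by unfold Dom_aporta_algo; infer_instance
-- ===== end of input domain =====

-- B replaces A's nested scan by one intersection of all subsets plus one membership pass; objective: alternative algorithm (same result).

-- ===== PORT A =====
-- inner loop: 'for subset in parcial: if elemento not in subset: return True'
def pvAInner (elemento : Int) : List (List Int) → Bool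
  | [] => false
  | subset :: rest => if !(subset.contains elemento) then true else pvAInner elemento rest

-- outer loop: 'for elemento in nuevo: …'; falls through to 'return False'
def pvAOuter (parcial : List (List Int)) : List Int → Bool
  | [] => false
  | elemento :: rest => if pvAInner elemento parcial then true else pvAOuter parcial rest

def aporta_algo (parcial : List (List Int)) (nuevo : List Int) : Bool :=
  if parcial.length = 0 then true
  else pvAOuter parcial nuevo

-- ===== PORT B =====
def aporta_algo_alt (parcial : List (List Int)) (nuevo : List Int) : Bool :=
  match parcial with
  | [] => true
  | h :: t =>
    -- common = set(parcial[0]).intersection(*parcial[1:])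
    let common : PySem.Set Int := t.foldl (fun acc s => PySem.Set.inter acc s) (PySem.Set.ofList h)
    -- any(e not in common for e in nuevo)
    nuevo.any (fun e => !(PySem.Set.contains common e))

-- ===== PRECONDITION & SPEC =====
def Spec_aporta_algo (parcial : List (List Int)) (nuevo : List Int) (out : Bool) : Prop := out = aporta_algo_alt parcial nuevo
instance (parcial : List (List Int)) (nuevo : List Int) (out : Bool) : Decidable (Spec_aporta_algo parcial nuevo out) := by unfold Spec_aporta_algo; infer_instance

-- ===== CLAIM (what is proved, stated in full; the proofs are below) =====
def Claim_equal_aporta_algo : Prop := ∀ (parcial : List (List Int)) (nuevo : List Int), Dom_aporta_algo parcial nuevo → Spec_aporta_algo parcial nuevo (aporta_algo parcial nuevo)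

-- ===== LEMMAS AND PROOFS =====

theorem pvAInner_eq_any (elemento : Int) (l : List (List Int)) :
    pvAInner elemento l = l.any (fun s => !(s.contains elemento)) := by
  induction l with
  | nil => rfl
  | cons s rest ih =>
    simp only [pvAInner, List.any_cons, ih]
    cases s.contains elemento <;> simp

theorem pvAOuter_eq_any (parcial : List (List Int)) (nuevo : List Int) :
    pvAOuter parcial nuevo = nuevo.any (fun e => pvAInner e parcial) := by
  induction nuevo with
  | nil => rfl
  | cons e rest ih =>
    simp only [pvAOuter, List.any_cons, ih]
    by_cases h : pvAInner e parcial <;> simp [h]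

theorem mem_foldl_inter (t : List (List Int)) (acc : PySem.Set Int) (e : Int) :
    e ∈ t.foldl (fun acc s => PySem.Set.inter acc s) acc ↔ e ∈ acc ∧ ∀ s ∈ t, e ∈ s := by
  induction t generalizing acc with
  | nil => simp
  | cons s rest ih =>
    simp only [List.foldl_cons, ih, PySem.Set.mem_inter, List.mem_cons]
    constructor
    · rintro ⟨⟨ha, hs⟩, hrest⟩
      refine ⟨ha, fun x hx => ?_⟩
      rcases hx with rfl | hx
      · exact hs
      · exact hrest x hx
    · rintro ⟨ha, hall⟩
      exact ⟨⟨ha, hall s (Or.inl rfl)⟩, fun x hx => hall x (Or.inr hx)⟩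

-- ===== VERDICT (by name: the statement is the Claim_ definition above) =====
theorem aporta_algo_spec : Claim_equal_aporta_algo := by
  intro parcial nuevo _
  unfold Spec_aporta_algo aporta_algo aporta_algo_alt
  match parcial with
  | [] => rfl
  | h :: t =>
    simp only [List.length_cons, Nat.succ_ne_zero, if_false]
    rw [pvAOuter_eq_any]
    refine List.any_congr rfl (fun e => ?_)
    rw [pvAInner_eq_any]
    have hco : ((t.foldl (fun acc s => PySem.Set.inter acc s) (PySem.Set.ofList h)).contains e = true)
        ↔ (e ∈ h ∧ ∀ s ∈ t, e ∈ s) := by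
      rw [PySem.Set.contains_iff, mem_foldl_inter, PySem.Set.mem_ofList]
    rw [Bool.eq_iff_iff]
    simp only [List.any_eq_true, List.mem_cons, Bool.not_eq_true', Bool.eq_false_iff, ne_eq, hco,
      List.contains_eq_mem, decide_eq_true_eq]
    constructor
    · rintro ⟨x, hx, hex⟩ ⟨heh, hall⟩
      rcases hx with rfl | hx
      · exact hex heh
      · exact hex (hall x hx)
    · intro hn
      by_cases heh : e ∈ h
      · have hnall : ¬ ∀ s ∈ t, e ∈ s := fun hall => hn ⟨heh, hall⟩
        simp only [not_forall] at hnall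
        obtain ⟨s, hs, hes⟩ := hnall
        exact ⟨s, Or.inr hs, hes⟩
      · exact ⟨h, Or.inl rfl, heh⟩
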